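-- pv_equiv track=rewrite | github.com/galbah/Python-projects | hanoi_game/ex7.py | compare_2d_lists
-- ===== SOURCE A (Python) =====
-- from typing import Any, List
--
-- def _compare_1d_lists(l1: List[int], l2: List[int]) -> bool :
--     # returns True if 2 lists are even and False otherwise
--     if l1 == [] and l2 == []:
--         return True
--     if len(l1) == 1 and len(l2) == 1 :
--         if l1[0] == l2[0] :
--             return True
--         else :
--             return False
--     if len(l1) != len(l2) :
--         return False
--     if l1[0] == l2[0] :
--         del l1[0]
--         del l2[0]
--         return _compare_1d_lists(l1, l2)
--     else:
--         return False
--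
-- def compare_2d_lists(l1: List[List[int]], l2: List[List[int]]) -> bool :
--     #compares 2 2d lists and returns True if they are even and False otherwise
--     if l1 == [] and l2 == [] :
--         return True
--     if len(l1) == 1 and len(l2) == 1 :
--         if _compare_1d_lists(l1[0], l2[0]) :
--             return True
--         else :
--             return False
--     if len(l1) != len(l2) :
--         return False
--     if _compare_1d_lists(l1[0], l2[0]) :
--         del l1[0]
--         del l2[0]
--         return compare_2d_lists(l1, l2)
--     else:
--         return False
-- ===== SOURCE B (Python) =====
-- from typing import List
--
-- def compare_2d_lists(l1: List[List[int]], l2: List[List[int]]) -> bool: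
--     # Direct structural equality; no recursion, no mutation of the inputs.
--     return l1 == l2
-- ===== Notes on version B (the rewrite author's own statement) =====
-- stated objective: idiomatic
-- what changed: Replaced the two mutually deleting recursive comparators (which destructively del elements from both lists) with a single built-in structural equality l1 == l2; note A mutates its arguments while B does not, the equivalence is about the return value only.
import Mathlib
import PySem

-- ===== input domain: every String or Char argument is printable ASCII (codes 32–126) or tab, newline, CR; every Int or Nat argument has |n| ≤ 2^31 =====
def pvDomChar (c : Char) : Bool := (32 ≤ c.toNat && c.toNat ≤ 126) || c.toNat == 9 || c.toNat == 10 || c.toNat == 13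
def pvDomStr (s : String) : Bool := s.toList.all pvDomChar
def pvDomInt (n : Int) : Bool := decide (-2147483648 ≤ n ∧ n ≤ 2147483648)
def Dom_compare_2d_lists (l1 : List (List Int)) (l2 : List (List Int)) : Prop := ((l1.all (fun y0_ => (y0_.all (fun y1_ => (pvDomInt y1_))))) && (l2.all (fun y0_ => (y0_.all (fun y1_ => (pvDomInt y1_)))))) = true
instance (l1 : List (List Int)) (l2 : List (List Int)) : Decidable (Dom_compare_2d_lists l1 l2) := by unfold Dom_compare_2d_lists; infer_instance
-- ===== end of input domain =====

-- B replaces A's mutually deleting recursion with built-in structural equality (return value only: A mutates its arguments, B does not).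


-- ===== PORT A =====
def pv_compare_1d_lists (l1 : List Int) (l2 : List Int) : Bool :=
  if l1 = [] ∧ l2 = [] then true
  else if l1.length = 1 ∧ l2.length = 1 then
    PySem.List.pyGet? l1 0 == PySem.List.pyGet? l2 0
  else if l1.length ≠ l2.length then false
  else if PySem.List.pyGet? l1 0 == PySem.List.pyGet? l2 0 then
    -- del l1[0]; del l2[0]; recurse (on the return value, deletion = dropping the head)
    pv_compare_1d_lists l1.tail l2.tail
  else false
termination_by l1.length
decreasing_by
  cases l1 with
  | nil =>
      simp only [List.length_nil] at *
      have h2 : l2 = [] := List.eq_nil_of_length_eq_zero (by omega)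
      simp_all
  | cons a t => simp

def compare_2d_lists (l1 : List (List Int)) (l2 : List (List Int)) : Bool :=
  if l1 = [] ∧ l2 = [] then true
  else if l1.length = 1 ∧ l2.length = 1 then
    if pv_compare_1d_lists ((PySem.List.pyGet? l1 0).getD []) ((PySem.List.pyGet? l2 0).getD []) then true else false
  else if l1.length ≠ l2.length then false
  else if pv_compare_1d_lists ((PySem.List.pyGet? l1 0).getD []) ((PySem.List.pyGet? l2 0).getD []) then
    compare_2d_lists l1.tail l2.tail
  else false
termination_by l1.length
decreasing_by
  cases l1 with
  | nil =>
      simp only [List.length_nil] at *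
      have h2 : l2 = [] := List.eq_nil_of_length_eq_zero (by omega)
      simp_all
  | cons a t => simp


-- ===== PORT B =====
def compare_2d_lists_alt (l1 : List (List Int)) (l2 : List (List Int)) : Bool :=
  l1 == l2


-- ===== PRECONDITION & SPEC =====
def Spec_compare_2d_lists (l1 : List (List Int)) (l2 : List (List Int)) (out : Bool) : Prop := out = compare_2d_lists_alt l1 l2
instance (l1 : List (List Int)) (l2 : List (List Int)) (out : Bool) : Decidable (Spec_compare_2d_lists l1 l2 out) := by unfold Spec_compare_2d_lists; infer_instance

-- ===== CLAIM (what is proved, stated in full; the proofs are below) =====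
def Claim_equal_compare_2d_lists : Prop := ∀ (l1 : List (List Int)) (l2 : List (List Int)), Dom_compare_2d_lists l1 l2 → Spec_compare_2d_lists l1 l2 (compare_2d_lists l1 l2)

-- ===== LEMMAS AND PROOFS =====

-- ===== VERDICT (by name: the statement is the Claim_ definition above) =====
lemma pv_compare_1d_eq (l1 l2 : List Int) : pv_compare_1d_lists l1 l2 = (l1 == l2) := by
  induction l1 generalizing l2 with
  | nil =>
    rw [pv_compare_1d_lists.eq_def]
    cases l2 <;> simp
  | cons a t ih =>
    cases l2 with
    | nil => rw [pv_compare_1d_lists.eq_def]; simp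
    | cons b u =>
      rw [pv_compare_1d_lists.eq_def, if_neg (by simp)]
      simp only [List.length_cons, PySem.List.pyGet?_zero_cons]
      split_ifs with h2 h3 h4
      · have ht : t = [] := List.eq_nil_of_length_eq_zero (by omega)
        have hu : u = [] := List.eq_nil_of_length_eq_zero (by omega)
        subst ht hu; simp
      · have : t ≠ u := fun e => h3 (by simp [e])
        simp_all
      · have hab : a = b := by simpa using h4
        subst hab; simp [ih]
      · have hab : a ≠ b := by simpa using h4
        simp [hab]

lemma compare_2d_eq (l1 l2 : List (List Int)) : compare_2d_lists l1 l2 = (l1 == l2) := by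
  induction l1 generalizing l2 with
  | nil =>
    rw [compare_2d_lists.eq_def]
    cases l2 <;> simp
  | cons a t ih =>
    cases l2 with
    | nil => rw [compare_2d_lists.eq_def]; simp
    | cons b u =>
      rw [compare_2d_lists.eq_def, if_neg (by simp)]
      simp only [List.length_cons, PySem.List.pyGet?_zero_cons, Option.getD_some, pv_compare_1d_eq]
      split_ifs with h2 hab h3 h4
      · have ht : t = [] := List.eq_nil_of_length_eq_zero (by omega)
        have hu : u = [] := List.eq_nil_of_length_eq_zero (by omega)
        have : a = b := by simpa using hab
        subst ht hu this; simp
      · have : a ≠ b := by simpa using hab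
        simp [this]
      · have : t ≠ u := fun e => h3 (by simp [e])
        simp_all
      · have hab' : a = b := by simpa using h4
        subst hab'; simp [ih]
      · have hab' : a ≠ b := by simpa using h4
        simp [hab']

theorem compare_2d_lists_spec : Claim_equal_compare_2d_lists := by
  intro l1 l2 _
  unfold Spec_compare_2d_lists compare_2d_lists_alt
  exact compare_2d_eq l1 l2
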